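-- pv_equiv track=rewrite | github.com/CajeerTeam/CajeerBots | bots/discord/bot/bot_routing.py | routed_interest_aliases
-- ===== SOURCE A (Python) =====
-- INTEREST_EVENT_ROUTING: dict[str, list[str]] = {
--     'community.world_signal.created': ['lore'],
--     'community.event.reminder': ['events'],
--     'community.stage.announcement': ['events'],
--     'community.guild_recruitment.created': ['guilds'],
--     'community.guild_recruitment.bumped': ['guilds'],
--     'community.chronicle.created': ['lore'],
--     'community.chronicle.status_changed': ['lore'],
--     'community.chronicle.comment.appended': ['lore'],
--     'community.lore_discussion.created': ['lore'],
--     'community.lore_discussion.comment.appended': ['lore'],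
--     'community.announcement.created': ['news'],
--     'community.announcement.updated': ['news'],
--     'community.announcement.deleted': ['news'],
--     'community.devlog.created': ['devlogs'],
--     'community.devlog.updated': ['devlogs'],
--     'community.devlog.deleted': ['devlogs'],
--     'community.support.created': ['news'],
--     'community.bug_report.created': ['gameplay'],
--     'community.suggestion.created': ['gameplay'],
--     'community.appeal.created': ['news'],
--     'community.appeal.status_changed': ['news'],
--     'community.appeal.comment.appended': ['news'],
--     'community.report.created': ['news'],
--     'community.report.status_changed': ['news'],
--     'community.report.comment.appended': ['news'],
--     'community.report.comment.edited': ['news'],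
--     'community.report.comment.deleted': ['news'],
-- }
--
-- def routed_interest_aliases(event_kind: str) -> list[str]:
--     event_key = str(event_kind or '').strip().lower()
--     if not event_key:
--         return []
--     if event_key in INTEREST_EVENT_ROUTING:
--         return list(INTEREST_EVENT_ROUTING[event_key])
--     prefix_map = {
--         'community.world_signal.': ['lore'],
--         'community.event.': ['events'],
--         'community.stage.': ['events'],
--         'community.guild_recruitment.': ['guilds'],
--         'community.chronicle.': ['lore'],
--         'community.lore_discussion.': ['lore'],
--         'community.announcement.': ['news'],
--         'community.devlog.': ['devlogs'],
--         'community.support.': ['news'],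
--         'community.bug_report.': ['gameplay'],
--         'community.suggestion.': ['gameplay'],
--         'community.appeal.': ['news'],
--         'community.report.': ['news'],
--     }
--     for prefix, aliases in prefix_map.items():
--         if event_key.startswith(prefix):
--             return list(aliases)
--     return []
-- ===== SOURCE B (Python) =====
-- _PREFIX_ROUTING: dict[str, list[str]] = {
--     'community.world_signal.': ['lore'],
--     'community.event.': ['events'],
--     'community.stage.': ['events'],
--     'community.guild_recruitment.': ['guilds'],
--     'community.chronicle.': ['lore'],
--     'community.lore_discussion.': ['lore'],
--     'community.announcement.': ['news'],
--     'community.devlog.': ['devlogs'],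
--     'community.support.': ['news'],
--     'community.bug_report.': ['gameplay'],
--     'community.suggestion.': ['gameplay'],
--     'community.appeal.': ['news'],
--     'community.report.': ['news'],
-- }
--
--
-- def routed_interest_aliases(event_kind: str) -> list[str]:
--     # Every exact route in A's INTEREST_EVENT_ROUTING agrees with its two-component
--     # prefix, so a single prefix lookup covers both of A's stages.
--     parts = str(event_kind or '').strip().lower().split('.')
--     if len(parts) < 3:
--         return []
--     return list(_PREFIX_ROUTING.get(parts[0] + '.' + parts[1] + '.', []))
-- ===== Notes on version B (the rewrite author's own statement) =====
-- stated objective: simpler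
-- what changed: B drops A's 27-entry exact-match dictionary entirely (every exact route agrees with its two-component prefix route) and replaces A's startswith-scan over 13 prefixes by splitting the normalized key at dots and doing one direct lookup of the prefix rebuilt from the first two components, returning [] when the key has fewer than three dot-separated parts.
import Mathlib
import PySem

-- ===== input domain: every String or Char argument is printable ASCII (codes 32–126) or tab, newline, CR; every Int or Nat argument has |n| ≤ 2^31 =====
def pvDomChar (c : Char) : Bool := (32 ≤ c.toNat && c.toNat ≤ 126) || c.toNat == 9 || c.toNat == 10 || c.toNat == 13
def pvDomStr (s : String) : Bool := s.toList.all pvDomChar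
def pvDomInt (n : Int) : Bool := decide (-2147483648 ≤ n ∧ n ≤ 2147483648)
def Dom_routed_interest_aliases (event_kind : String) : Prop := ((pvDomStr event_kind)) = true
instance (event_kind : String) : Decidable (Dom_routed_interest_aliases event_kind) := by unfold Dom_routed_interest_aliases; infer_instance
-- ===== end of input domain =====

set_option maxHeartbeats 1000000


-- B drops A's exact-match dictionary (each exact route agrees with its two-component prefix
-- route) and replaces the startswith-scan by a split at dots and one lookup (objective: simpler).

-- ===== PORT A =====
-- module-level INTEREST_EVENT_ROUTING
def interestRouting : PySem.Dict String (List String) := PySem.Dict.ofList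
  [ ("community.world_signal.created", ["lore"])
  , ("community.event.reminder", ["events"])
  , ("community.stage.announcement", ["events"])
  , ("community.guild_recruitment.created", ["guilds"])
  , ("community.guild_recruitment.bumped", ["guilds"])
  , ("community.chronicle.created", ["lore"])
  , ("community.chronicle.status_changed", ["lore"])
  , ("community.chronicle.comment.appended", ["lore"])
  , ("community.lore_discussion.created", ["lore"])
  , ("community.lore_discussion.comment.appended", ["lore"])
  , ("community.announcement.created", ["news"])
  , ("community.announcement.updated", ["news"])
  , ("community.announcement.deleted", ["news"])
  , ("community.devlog.created", ["devlogs"])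
  , ("community.devlog.updated", ["devlogs"])
  , ("community.devlog.deleted", ["devlogs"])
  , ("community.support.created", ["news"])
  , ("community.bug_report.created", ["gameplay"])
  , ("community.suggestion.created", ["gameplay"])
  , ("community.appeal.created", ["news"])
  , ("community.appeal.status_changed", ["news"])
  , ("community.appeal.comment.appended", ["news"])
  , ("community.report.created", ["news"])
  , ("community.report.status_changed", ["news"])
  , ("community.report.comment.appended", ["news"])
  , ("community.report.comment.edited", ["news"])
  , ("community.report.comment.deleted", ["news"]) ]

-- the (prefix, aliases) pairs of A's local prefix_map, in source order
def prefixPairs : List (String × List String) :=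
  [ ("community.world_signal.", ["lore"])
  , ("community.event.", ["events"])
  , ("community.stage.", ["events"])
  , ("community.guild_recruitment.", ["guilds"])
  , ("community.chronicle.", ["lore"])
  , ("community.lore_discussion.", ["lore"])
  , ("community.announcement.", ["news"])
  , ("community.devlog.", ["devlogs"])
  , ("community.support.", ["news"])
  , ("community.bug_report.", ["gameplay"])
  , ("community.suggestion.", ["gameplay"])
  , ("community.appeal.", ["news"])
  , ("community.report.", ["news"]) ]

def routed_interest_aliases (event_kind : String) : List String :=
  -- 'str(event_kind or "")' is the identity on str input ('' stays ''); then .strip().lower()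
  let event_key := PySem.Str.lower (PySem.Str.strip event_kind)
  if event_key = "" then []
  else if interestRouting.contains event_key then
    (interestRouting.get? event_key).getD []   -- exact: guarded by contains, so no KeyError
  else
    -- 'for prefix, aliases in prefix_map.items(): if event_key.startswith(prefix): return list(aliases)'
    let prefix_map : PySem.Dict String (List String) := PySem.Dict.ofList prefixPairs
    match prefix_map.items.find? (fun p => PySem.Str.startswith event_key p.1) with
    | some p => p.2
    | none => []

-- ===== PORT B =====
def prefixRoutingB : PySem.Dict String (List String) := PySem.Dict.ofList prefixPairs

def routed_interest_aliases_alt (event_kind : String) : List String :=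
  -- parts = str(event_kind or '').strip().lower().split('.')
  let parts := (PySem.Str.split? (PySem.Str.lower (PySem.Str.strip event_kind)) ".").getD []   -- exact: sep "." ≠ "", so split? is some
  if parts.length < 3 then []
  else
    -- parts[0]/parts[1] are in range (length ≥ 3), so the pyGet? defaults never fire
    prefixRoutingB.getD ((PySem.List.pyGet? parts 0).getD "" ++ "." ++ (PySem.List.pyGet? parts 1).getD "" ++ ".") []

-- ===== PRECONDITION & SPEC =====
def Spec_routed_interest_aliases (event_kind : String) (out : List String) : Prop := out = routed_interest_aliases_alt event_kind
instance (event_kind : String) (out : List String) : Decidable (Spec_routed_interest_aliases event_kind out) := by unfold Spec_routed_interest_aliases; infer_instance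

-- ===== CLAIM (what is proved, stated in full; the proofs are below) =====
def Claim_equal_routed_interest_aliases : Prop := ∀ (event_kind : String), Dom_routed_interest_aliases event_kind → Spec_routed_interest_aliases event_kind (routed_interest_aliases event_kind)

-- ===== LEMMAS AND PROOFS =====

-- a simple structural model of Python's s.split('.')
def mySplit : List Char → List (List Char)
  | [] => [[]]
  | c :: t => if c = '.' then [] :: mySplit t else (mySplit t).modifyHead (c :: ·)

theorem mySplit_ne_nil (l : List Char) : mySplit l ≠ [] := by
  cases l with
  | nil => simp [mySplit]
  | cons c t =>
    simp only [mySplit]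
    split
    · simp
    · intro h
      have := congrArg List.length h
      simp [List.length_modifyHead] at this
      exact mySplit_ne_nil t this

theorem splitOn_go_eq (fuel : Nat) : ∀ (l cur : List Char) (acc : List (List Char)),
    l.length < fuel →
    PySem.Chars.splitOn.go ['.'] fuel l cur acc
      = acc.reverse ++ (mySplit l).modifyHead (cur.reverse ++ ·) := by
  induction fuel with
  | zero => intro l cur acc h; omega
  | succ f ih =>
    intro l cur acc h
    cases l with
    | nil => simp [PySem.Chars.splitOn.go, mySplit]
    | cons c t =>
      by_cases hc : c = '.'
      · subst hc
        rw [show PySem.Chars.splitOn.go ['.'] (f+1) ('.' :: t) cur acc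
              = PySem.Chars.splitOn.go ['.'] f t [] (cur.reverse :: acc) from by
            simp [PySem.Chars.splitOn.go, List.isPrefixOf]]
        rw [ih t [] (cur.reverse :: acc) (by simpa using h)]
        simp only [mySplit]
        rw [if_pos (by trivial)]
        cases mySplit t <;> simp
      · rw [show PySem.Chars.splitOn.go ['.'] (f+1) (c :: t) cur acc
              = PySem.Chars.splitOn.go ['.'] f t (c :: cur) acc from by
            have hb : List.isPrefixOf ['.'] (c :: t) = false := by
              simp [List.isPrefixOf]
              exact fun h => hc h.symm
            simp [PySem.Chars.splitOn.go, hb]]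
        rw [ih t (c :: cur) acc (by simpa using Nat.lt_of_succ_lt_succ h)]
        simp only [mySplit, if_neg hc]
        cases hm : mySplit t with
        | nil => exact absurd hm (mySplit_ne_nil t)
        | cons hd tl => simp

theorem splitOn_eq_mySplit (s : List Char) : PySem.Chars.splitOn s ['.'] = mySplit s := by
  rw [show PySem.Chars.splitOn s ['.'] = PySem.Chars.splitOn.go ['.'] (s.length + 1) s [] [] from rfl]
  rw [splitOn_go_eq (s.length + 1) s [] [] (by omega)]
  cases hm : mySplit s with
  | nil => exact absurd hm (mySplit_ne_nil s)
  | cons hd tl => simp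

theorem mySplit_prefix (a t : List Char) (ha : '.' ∉ a) :
    mySplit (a ++ '.' :: t) = a :: mySplit t := by
  induction a with
  | nil => simp [mySplit]
  | cons c a' ih =>
    have hc : c ≠ '.' := fun h => ha (h ▸ List.mem_cons_self ..)
    have ha' : '.' ∉ a' := fun h => ha (List.mem_cons_of_mem _ h)
    simp only [List.cons_append, mySplit, if_neg hc, ih ha']
    rfl

theorem mySplit_destruct (s : List Char) : ∀ (a : List Char) (l : List (List Char)),
    mySplit s = a :: l → l ≠ [] →
    ∃ t, s = a ++ '.' :: t ∧ mySplit t = l ∧ '.' ∉ a := by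
  induction s with
  | nil =>
    intro a l h hl
    simp [mySplit] at h
    exact absurd h.2 hl
  | cons c t ih =>
    intro a l h hl
    by_cases hc : c = '.'
    · subst hc
      simp [mySplit] at h
      exact ⟨t, by simp [← h.1], h.2.symm ▸ rfl, by simp [h.1]⟩
    · simp only [mySplit, if_neg hc] at h
      cases hm : mySplit t with
      | nil => exact absurd hm (mySplit_ne_nil t)
      | cons hd tl =>
        rw [hm] at h
        simp only [List.modifyHead, List.cons.injEq] at h
        obtain ⟨ha, hltl⟩ := h
        obtain ⟨t', ht', hmt', hnd⟩ := ih hd tl (hm.trans (by rw [hltl])) (hltl ▸ hl)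
        refine ⟨t', by simp [← ha, ht'], by rw [hmt', hltl], ?_⟩
        intro hmem
        rcases List.mem_cons.mp (ha ▸ hmem) with h1 | h2
        · exact hc h1.symm
        · exact hnd h2

theorem dot_decomp_unique (a : List Char) : ∀ (c r r' : List Char), '.' ∉ a → '.' ∉ c →
    a ++ '.' :: r = c ++ '.' :: r' → a = c ∧ r = r' := by
  induction a with
  | nil =>
    intro c r r' _ hc h
    cases c with
    | nil => simpa using h
    | cons x c' =>
      simp only [List.nil_append, List.cons_append, List.cons.injEq] at h
      exact absurd (h.1 ▸ List.mem_cons_self ..) hc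
  | cons x a' ih =>
    intro c r r' ha hc h
    cases c with
    | nil =>
      simp only [List.cons_append, List.nil_append, List.cons.injEq] at h
      exact absurd (h.1 ▸ List.mem_cons_self ..) ha
    | cons y c' =>
      simp only [List.cons_append, List.cons.injEq] at h
      obtain ⟨hxy, h2⟩ := h
      have := ih c' r r' (fun m => ha (List.mem_cons_of_mem _ m))
        (fun m => hc (List.mem_cons_of_mem _ m)) h2
      exact ⟨by rw [hxy, this.1], this.2⟩

-- parts, as B computes them, are mySplit on the character list
theorem parts_eq (k : String) :
    (PySem.Str.split? k ".").getD [] = (mySplit k.toList).map String.ofList := by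
  simp [PySem.Str.split?, PySem.Chars.split?, splitOn_eq_mySplit,
    show ".".toList = ['.'] from rfl]

-- B's body on an already-normalized key, named for the proofs only
def altTail (k : String) : List String :=
  let parts := (PySem.Str.split? k ".").getD []
  if parts.length < 3 then []
  else
    prefixRoutingB.getD ((PySem.List.pyGet? parts 0).getD "" ++ "." ++ (PySem.List.pyGet? parts 1).getD "" ++ ".") []

theorem prefix_case (k K : String) (k0 k1 : List Char) (al : List String)
    (hK : K.toList = k0 ++ '.' :: (k1 ++ ['.'])) (h0 : '.' ∉ k0) (h1 : '.' ∉ k1)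
    (hsw : PySem.Str.startswith k K = true)
    (hget : prefixRoutingB.getD (String.ofList k0 ++ "." ++ String.ofList k1 ++ ".") [] = al) :
    altTail k = al := by
  have hpre : K.toList <+: k.toList := by
    simpa [PySem.Str.startswith, PySem.Chars.startswith, List.isPrefixOf_iff_prefix] using hsw
  obtain ⟨t, ht⟩ := hpre
  have hk : k.toList = k0 ++ '.' :: (k1 ++ '.' :: t) := by
    rw [← ht, hK]; simp
  have hsplit : mySplit k.toList = k0 :: k1 :: mySplit t := by
    rw [hk, mySplit_prefix _ _ h0, mySplit_prefix _ _ h1]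
  cases hm : mySplit t with
  | nil => exact absurd hm (mySplit_ne_nil t)
  | cons hd tl =>
    unfold altTail
    rw [parts_eq, hsplit, hm]
    simp only [List.map_cons, List.length_cons]
    rw [if_neg (by omega)]
    simpa [PySem.List.pyGet?, PySem.List.pyIdx?] using hget

theorem no_prefix_case (k : String)
    (hnone : ∀ p ∈ prefixPairs, PySem.Str.startswith k p.1 = false) :
    altTail k = [] := by
  unfold altTail
  rw [parts_eq]
  by_cases hlen : ((mySplit k.toList).map String.ofList).length < 3
  · rw [if_pos hlen]
  · rw [if_neg hlen]
    simp only [List.length_map, not_lt] at hlen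
    obtain ⟨a, b, c, rest, hm⟩ : ∃ a b c rest, mySplit k.toList = a :: b :: c :: rest := by
      rcases h1 : mySplit k.toList with _ | ⟨a, _ | ⟨b, _ | ⟨c, rest⟩⟩⟩ <;>
        (try exact ⟨_, _, _, _, rfl⟩) <;> (rw [h1] at hlen; simp at hlen)
    obtain ⟨t, ht, hmt, hna⟩ := mySplit_destruct _ _ _ hm (by simp)
    obtain ⟨t', ht', hmt', hnb⟩ := mySplit_destruct _ _ _ hmt (by simp)
    -- show the direct lookup of the reconstructed prefix misses, given no prefix matches
    have hcand : ∀ (K : String) (al : List String), (K, al) ∈ prefixPairs →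
        ∀ (k0 k1 : List Char), K.toList = k0 ++ '.' :: (k1 ++ ['.']) → '.' ∉ k0 → '.' ∉ k1 →
        ¬ (String.ofList a ++ "." ++ String.ofList b ++ "." = K) := by
      intro K al hmem k0 k1 hK h0 h1 heq
      have htl : a ++ '.' :: (b ++ ['.']) = k0 ++ '.' :: (k1 ++ ['.']) := by
        have := congrArg String.toList heq
        rw [hK] at this
        simpa using this
      obtain ⟨hab, hb⟩ := dot_decomp_unique a k0 (b ++ ['.']) (k1 ++ ['.']) hna h0 htl
      have hbb : b = k1 := by
        have := List.append_cancel_right (hb : b ++ ['.'] = k1 ++ ['.'])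
        exact this
      have hswt : PySem.Str.startswith k K = true := by
        simp only [PySem.Str.startswith, PySem.Chars.startswith, List.isPrefixOf_iff_prefix]
        refine ⟨t', ?_⟩
        rw [hK, ht, ht', ← hab, ← hbb]
        simp
      have hf := hnone (K, al) hmem
      simp only [PySem.Str.startswith] at hf hswt
      rw [hf] at hswt
      exact Bool.false_ne_true hswt
    rw [hm]
    simp only [List.map_cons]
    have hga : (PySem.List.pyGet? (String.ofList a :: String.ofList b :: String.ofList c :: rest.map String.ofList) 0).getD "" = String.ofList a := by
      simp [PySem.List.pyGet?, PySem.List.pyIdx?,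
        show (0:Int) ≤ (rest.length:Int) + 1 + 1 from by positivity]
    have hgb : (PySem.List.pyGet? (String.ofList a :: String.ofList b :: String.ofList c :: rest.map String.ofList) 1).getD "" = String.ofList b := by
      simp [PySem.List.pyGet?, PySem.List.pyIdx?,
        show (0:Int) ≤ (rest.length:Int) + 1 from by positivity]
    rw [hga, hgb]
    -- the direct lookup of the reconstructed prefix misses: its key equals no prefix key
    have hitems : prefixRoutingB.items = prefixPairs := by decide
    have hfind : prefixPairs.find?
        (fun p => p.1 == String.ofList a ++ "." ++ String.ofList b ++ ".") = none := by
      apply List.find?_eq_none.mpr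
      intro p hp
      simp only [prefixPairs, List.mem_cons, List.not_mem_nil, or_false] at hp
      rcases hp with h|h|h|h|h|h|h|h|h|h|h|h|h <;> subst h <;>
        simp only [beq_iff_eq] <;> intro hq
      · exact hcand "community.world_signal." ["lore"] (by simp [prefixPairs]) "community".toList "world_signal".toList (by decide) (by decide) (by decide) hq.symm
      · exact hcand "community.event." ["events"] (by simp [prefixPairs]) "community".toList "event".toList (by decide) (by decide) (by decide) hq.symm
      · exact hcand "community.stage." ["events"] (by simp [prefixPairs]) "community".toList "stage".toList (by decide) (by decide) (by decide) hq.symm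
      · exact hcand "community.guild_recruitment." ["guilds"] (by simp [prefixPairs]) "community".toList "guild_recruitment".toList (by decide) (by decide) (by decide) hq.symm
      · exact hcand "community.chronicle." ["lore"] (by simp [prefixPairs]) "community".toList "chronicle".toList (by decide) (by decide) (by decide) hq.symm
      · exact hcand "community.lore_discussion." ["lore"] (by simp [prefixPairs]) "community".toList "lore_discussion".toList (by decide) (by decide) (by decide) hq.symm
      · exact hcand "community.announcement." ["news"] (by simp [prefixPairs]) "community".toList "announcement".toList (by decide) (by decide) (by decide) hq.symm
      · exact hcand "community.devlog." ["devlogs"] (by simp [prefixPairs]) "community".toList "devlog".toList (by decide) (by decide) (by decide) hq.symm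
      · exact hcand "community.support." ["news"] (by simp [prefixPairs]) "community".toList "support".toList (by decide) (by decide) (by decide) hq.symm
      · exact hcand "community.bug_report." ["gameplay"] (by simp [prefixPairs]) "community".toList "bug_report".toList (by decide) (by decide) (by decide) hq.symm
      · exact hcand "community.suggestion." ["gameplay"] (by simp [prefixPairs]) "community".toList "suggestion".toList (by decide) (by decide) (by decide) hq.symm
      · exact hcand "community.appeal." ["news"] (by simp [prefixPairs]) "community".toList "appeal".toList (by decide) (by decide) (by decide) hq.symm
      · exact hcand "community.report." ["news"] (by simp [prefixPairs]) "community".toList "report".toList (by decide) (by decide) (by decide) hq.symm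
    simp [PySem.Dict.getD, PySem.Dict.get?, hitems, hfind]

-- A's fallback loop agrees with B's body on any (normalized) key
theorem tail_eq (k : String) :
    (match (PySem.Dict.ofList prefixPairs).items.find? (fun p => PySem.Str.startswith k p.1) with
      | some p => p.2
      | none => []) = altTail k := by
  have hitems : (PySem.Dict.ofList prefixPairs).items = prefixPairs := by decide
  rw [hitems]
  cases hf : prefixPairs.find? (fun p => PySem.Str.startswith k p.1) with
  | none =>
    rw [no_prefix_case k (by
      intro p hp
      have := List.find?_eq_none.mp hf p hp
      simpa using this)]
  | some p =>
    have hpred : PySem.Str.startswith k p.1 = true := by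
      simpa using List.find?_some hf
    have hmem : p ∈ prefixPairs := List.mem_of_find?_eq_some hf
    simp only [prefixPairs, List.mem_cons, List.not_mem_nil, or_false] at hmem
    rcases hmem with h | h | h | h | h | h | h | h | h | h | h | h | h <;> subst h <;> refine Eq.symm ?_
    · exact prefix_case k "community.world_signal." "community".toList "world_signal".toList ["lore"] (by decide) (by decide) (by decide) hpred (by decide)
    · exact prefix_case k "community.event." "community".toList "event".toList ["events"] (by decide) (by decide) (by decide) hpred (by decide)
    · exact prefix_case k "community.stage." "community".toList "stage".toList ["events"] (by decide) (by decide) (by decide) hpred (by decide)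
    · exact prefix_case k "community.guild_recruitment." "community".toList "guild_recruitment".toList ["guilds"] (by decide) (by decide) (by decide) hpred (by decide)
    · exact prefix_case k "community.chronicle." "community".toList "chronicle".toList ["lore"] (by decide) (by decide) (by decide) hpred (by decide)
    · exact prefix_case k "community.lore_discussion." "community".toList "lore_discussion".toList ["lore"] (by decide) (by decide) (by decide) hpred (by decide)
    · exact prefix_case k "community.announcement." "community".toList "announcement".toList ["news"] (by decide) (by decide) (by decide) hpred (by decide)
    · exact prefix_case k "community.devlog." "community".toList "devlog".toList ["devlogs"] (by decide) (by decide) (by decide) hpred (by decide)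
    · exact prefix_case k "community.support." "community".toList "support".toList ["news"] (by decide) (by decide) (by decide) hpred (by decide)
    · exact prefix_case k "community.bug_report." "community".toList "bug_report".toList ["gameplay"] (by decide) (by decide) (by decide) hpred (by decide)
    · exact prefix_case k "community.suggestion." "community".toList "suggestion".toList ["gameplay"] (by decide) (by decide) (by decide) hpred (by decide)
    · exact prefix_case k "community.appeal." "community".toList "appeal".toList ["news"] (by decide) (by decide) (by decide) hpred (by decide)
    · exact prefix_case k "community.report." "community".toList "report".toList ["news"] (by decide) (by decide) (by decide) hpred (by decide)

-- A's exact-match hit agrees with B's body: each exact key's value equals its prefix route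
theorem exact_case (k : String) (h : interestRouting.contains k = true) :
    (interestRouting.get? k).getD [] = altTail k := by
  have hk : k ∈ interestRouting.keys := (PySem.Dict.contains_iff_mem_keys _ _).mp h
  have hkeys : interestRouting.keys =
    [ "community.world_signal.created", "community.event.reminder", "community.stage.announcement"
    , "community.guild_recruitment.created", "community.guild_recruitment.bumped"
    , "community.chronicle.created", "community.chronicle.status_changed", "community.chronicle.comment.appended"
    , "community.lore_discussion.created", "community.lore_discussion.comment.appended"
    , "community.announcement.created", "community.announcement.updated", "community.announcement.deleted"
    , "community.devlog.created", "community.devlog.updated", "community.devlog.deleted"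
    , "community.support.created", "community.bug_report.created", "community.suggestion.created"
    , "community.appeal.created", "community.appeal.status_changed", "community.appeal.comment.appended"
    , "community.report.created", "community.report.status_changed", "community.report.comment.appended"
    , "community.report.comment.edited", "community.report.comment.deleted" ] := by decide
  rw [hkeys] at hk
  simp only [List.mem_cons, List.not_mem_nil, or_false] at hk
  rcases hk with h|h|h|h|h|h|h|h|h|h|h|h|h|h|h|h|h|h|h|h|h|h|h|h|h|h|h <;> subst h <;> decide

theorem alt_eq_altTail (ek : String) :
    routed_interest_aliases_alt ek = altTail (PySem.Str.lower (PySem.Str.strip ek)) := rfl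

-- ===== VERDICT (by name: the statement is the Claim_ definition above) =====
theorem routed_interest_aliases_spec : Claim_equal_routed_interest_aliases := by
  intro ek _
  unfold Spec_routed_interest_aliases
  rw [alt_eq_altTail]
  unfold routed_interest_aliases
  simp only []
  generalize PySem.Str.lower (PySem.Str.strip ek) = k
  by_cases h1 : k = ""
  · subst h1
    rw [if_pos rfl]
    decide
  · rw [if_neg h1]
    by_cases h2 : interestRouting.contains k = true
    · rw [if_pos h2]
      exact exact_case k h2
    · rw [if_neg h2]
      exact tail_eq k
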